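-- pv_equiv track=rewrite | github.com/paqui4ever/Algoritmos-y-Estructuras-de-Datos-I | guia8/tests.py | split_homemade_v2
-- ===== SOURCE A (Python) =====
-- def split_homemade_v2 (texto:str) -> list[str]: # La hago de nuevo solo como practica
--     palabra = ""
--     palabras = []
--     termino_palabra = None
--     for caracter in texto:
--         if caracter not in [" ", "\n"]:
--             palabra += caracter
--             termino_palabra = True
--         else:
--             termino_palabra = False
--             if not termino_palabra:
--                 palabras.append(palabra)
--                 palabra = ""
--     if palabra != "":
--         palabras.append(palabra)
--     return palabras
-- ===== SOURCE B (Python) =====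
-- def split_homemade_v2(texto: str) -> list[str]:
--     parts = texto.replace('\n', ' ').split(' ')
--     if parts[-1] == '':
--         parts.pop()
--     return parts
-- ===== Notes on version B (the rewrite author's own statement) =====
-- stated objective: faster
-- what changed: Replaces the char-by-char accumulator loop (quadratic string concatenation) with one str.replace + str.split(' ') call, then drops the single trailing empty token that A never emits.
import Mathlib
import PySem

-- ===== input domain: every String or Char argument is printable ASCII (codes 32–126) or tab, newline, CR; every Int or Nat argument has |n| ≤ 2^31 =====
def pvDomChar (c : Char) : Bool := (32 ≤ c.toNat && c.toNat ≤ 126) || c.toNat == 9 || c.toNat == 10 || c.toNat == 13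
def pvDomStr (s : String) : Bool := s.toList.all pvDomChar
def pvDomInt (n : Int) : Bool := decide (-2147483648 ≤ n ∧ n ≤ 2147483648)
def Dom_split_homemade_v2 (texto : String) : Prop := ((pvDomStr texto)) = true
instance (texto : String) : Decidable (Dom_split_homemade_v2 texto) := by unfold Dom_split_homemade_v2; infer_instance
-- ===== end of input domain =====

-- B replaces A's char-by-char accumulator loop with one replace+split pass that keeps
-- empty tokens and then drops the single trailing empty token A never emits (idiomatic).

-- ===== PORT A =====
-- A's loop body: the flag 'termino_palabra' is write-only (the inner 'if not termino_palabra'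
-- always fires right after setting it False), so the port carries only (palabra, palabras).
-- 'palabra' is kept as a List Char ('palabra += caracter' appends one char).
def pvStepA (s : List Char × List String) (c : Char) : List Char × List String :=
  if c ≠ ' ' ∧ c ≠ '\n' then (s.1 ++ [c], s.2) else ([], s.2 ++ [String.ofList s.1])

-- the code after the loop: 'if palabra != "": palabras.append(palabra); return palabras'
def pvFinishA (st : List Char × List String) : List String :=
  if st.1 = [] then st.2 else st.2 ++ [String.ofList st.1]

def split_homemade_v2 (texto : String) : List String :=
  pvFinishA (texto.toList.foldl pvStepA ([], []))

-- ===== PORT B =====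
-- parts = texto.replace('\n', ' ').split(' ')  -- split? is some: ' ' is a non-empty separator
-- if parts[-1] == '': parts.pop()              -- parts is never empty; pop() drops the last element
def split_homemade_v2_alt (texto : String) : List String :=
  let parts := (PySem.Str.split? (PySem.Str.replace texto "\n" " ") " ").getD []
  if parts.getLast? = some "" then parts.dropLast else parts

-- ===== PRECONDITION & SPEC =====
def Spec_split_homemade_v2 (texto : String) (out : List String) : Prop := out = split_homemade_v2_alt texto
instance (texto : String) (out : List String) : Decidable (Spec_split_homemade_v2 texto out) := by unfold Spec_split_homemade_v2; infer_instance

-- ===== CLAIM (what is proved, stated in full; the proofs are below) =====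
def Claim_equal_split_homemade_v2 : Prop := ∀ (texto : String), Dom_split_homemade_v2 texto → Spec_split_homemade_v2 texto (split_homemade_v2 texto)

-- ===== LEMMAS AND PROOFS =====

-- '\n' collapsed to ' ' (what texto.replace('\n', ' ') does per character)
def pvF (c : Char) : Char := if c = '\n' then ' ' else c

-- split on single separator ' ' keeping empty pieces, front recursion
def pvSE : List Char → List (List Char)
  | [] => [[]]
  | c :: cs => if c = ' ' then [] :: pvSE cs
      else match pvSE cs with
        | t :: ts => (c :: t) :: ts
        | [] => [[c]]

-- prepend p to the first piece
def pvConsHead (p : List Char) : List (List Char) → List (List Char)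
  | t :: ts => (p ++ t) :: ts
  | [] => [p]

-- the tokens A's loop emits, starting with partial word pal
def pvTokens : List Char → List Char → List (List Char)
  | pal, [] => if pal = [] then [] else [pal]
  | pal, c :: cs => if c ≠ ' ' ∧ c ≠ '\n' then pvTokens (pal ++ [c]) cs else pal :: pvTokens [] cs

-- drop the last piece iff it is empty (B's conditional pop)
def pvFixup (l : List (List Char)) : List (List Char) :=
  if l.getLast? = some [] then l.dropLast else l

theorem pvSE_ne_nil (cs : List Char) : pvSE cs ≠ [] := by
  cases cs with
  | nil => simp [pvSE]
  | cons c t =>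
    simp only [pvSE]
    split
    · simp
    · split <;> simp

theorem pvConsHead_nil {r : List (List Char)} (h : r ≠ []) : pvConsHead [] r = r := by
  cases r with
  | nil => exact absurd rfl h
  | cons t ts => simp [pvConsHead]

theorem pvFixup_cons (x : List Char) {r : List (List Char)} (h : r ≠ []) :
    pvFixup (x :: r) = x :: pvFixup r := by
  obtain ⟨y, ys, rfl⟩ := List.exists_cons_of_ne_nil h
  simp only [pvFixup, List.getLast?_cons_cons]
  split <;> simp [List.dropLast]

theorem pvReplace_go_single : ∀ (fuel : Nat) (l acc : List Char), l.length ≤ fuel →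
    PySem.Chars.replace.go ['\n'] [' '] fuel l acc = acc.reverse ++ l.map pvF := by
  intro fuel
  induction fuel with
  | zero =>
    intro l acc h
    have : l = [] := List.eq_nil_of_length_eq_zero (Nat.le_zero.mp h)
    subst this
    simp [PySem.Chars.replace.go]
  | succ n ih =>
    intro l acc h
    cases l with
    | nil => simp [PySem.Chars.replace.go]
    | cons c t =>
      rw [PySem.Chars.replace.go]
      by_cases hc : c = '\n'
      · subst hc
        simp [List.isPrefixOf, ih t _ (by simpa using h), pvF]
      · simp [List.isPrefixOf, hc, ih t _ (by simpa using h), pvF,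
          show ('\n' == c) = false by simpa using fun e => hc e.symm]

theorem pvReplace_single (cs : List Char) :
    PySem.Chars.replace cs ['\n'] [' '] = cs.map pvF := by
  unfold PySem.Chars.replace
  simpa using pvReplace_go_single cs.length cs [] le_rfl

theorem pvSplitOn_go_single : ∀ (fuel : Nat) (l cur : List Char) (accl : List (List Char)),
    l.length ≤ fuel →
    PySem.Chars.splitOn.go [' '] fuel l cur accl = accl.reverse ++ pvConsHead cur.reverse (pvSE l) := by
  intro fuel
  induction fuel with
  | zero =>
    intro l cur accl h
    have : l = [] := List.eq_nil_of_length_eq_zero (Nat.le_zero.mp h)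
    subst this
    simp [PySem.Chars.splitOn.go, pvSE, pvConsHead]
  | succ n ih =>
    intro l cur accl h
    cases l with
    | nil => simp [PySem.Chars.splitOn.go, pvSE, pvConsHead]
    | cons c t =>
      rw [PySem.Chars.splitOn.go]
      by_cases hc : c = ' '
      · subst hc
        rw [if_pos (by simp [List.isPrefixOf])]
        rw [show List.drop [' '].length (' ' :: t) = t from rfl]
        rw [ih t [] _ (by simpa using h)]
        obtain ⟨h', ts, hse⟩ := List.exists_cons_of_ne_nil (pvSE_ne_nil t)
        simp [pvSE, pvConsHead, hse]
      · rw [if_neg (by simp [List.isPrefixOf]; exact fun e => hc e.symm)]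
        rw [ih t (c :: cur) _ (by simpa using h)]
        obtain ⟨h', ts, hse⟩ := List.exists_cons_of_ne_nil (pvSE_ne_nil t)
        simp [pvSE, hc, hse, pvConsHead]

theorem pvSplitOn_single (cs : List Char) :
    PySem.Chars.splitOn cs [' '] = pvSE cs := by
  unfold PySem.Chars.splitOn
  rw [pvSplitOn_go_single (cs.length + 1) cs [] [] (by omega)]
  simp [pvConsHead_nil (pvSE_ne_nil cs)]

theorem pvFoldA (cs : List Char) : ∀ (pal : List Char) (acc : List String),
    pvFinishA (cs.foldl pvStepA (pal, acc)) = acc ++ (pvTokens pal cs).map String.ofList := by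
  induction cs with
  | nil =>
    intro pal acc
    by_cases h : pal = [] <;> simp [pvFinishA, pvTokens, h]
  | cons c t ih =>
    intro pal acc
    simp only [List.foldl_cons]
    by_cases hc : c ≠ ' ' ∧ c ≠ '\n'
    · rw [show pvStepA (pal, acc) c = (pal ++ [c], acc) by simp [pvStepA, hc]]
      rw [ih (pal ++ [c]) acc]
      simp [pvTokens, hc]
    · rw [show pvStepA (pal, acc) c = ([], acc ++ [String.ofList pal]) by simp [pvStepA, hc]]
      rw [ih [] (acc ++ [String.ofList pal])]
      simp [pvTokens, hc]

theorem pvTokens_eq (cs : List Char) : ∀ (pal : List Char),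
    pvTokens pal cs = pvFixup (pvConsHead pal (pvSE (cs.map pvF))) := by
  induction cs with
  | nil =>
    intro pal
    by_cases h : pal = [] <;> simp [pvTokens, pvSE, pvConsHead, pvFixup, h]
  | cons c t ih =>
    intro pal
    by_cases hc : c ≠ ' ' ∧ c ≠ '\n'
    · have hf : pvF c = c := by simp [pvF, hc.2]
      obtain ⟨h', ts, hse⟩ := List.exists_cons_of_ne_nil (pvSE_ne_nil (t.map pvF))
      rw [show pvTokens pal (c :: t) = pvTokens (pal ++ [c]) t by simp [pvTokens, hc]]
      rw [ih (pal ++ [c])]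
      simp [pvSE, hf, hc.1, hse, pvConsHead]
    · have hf : pvF c = ' ' := by
        by_cases h1 : c = '\n'
        · simp [pvF, h1]
        · have h2 : c = ' ' := by tauto
          simp [pvF, h2]
      rw [show pvTokens pal (c :: t) = pal :: pvTokens [] t by simp [pvTokens, hc]]
      rw [ih []]
      rw [show (c :: t).map pvF = ' ' :: t.map pvF by simp [hf]]
      rw [show pvSE (' ' :: t.map pvF) = [] :: pvSE (t.map pvF) by simp [pvSE]]
      rw [show pvConsHead pal ([] :: pvSE (t.map pvF)) = pal :: pvSE (t.map pvF) by simp [pvConsHead]]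
      rw [pvFixup_cons pal (pvSE_ne_nil (t.map pvF))]
      rw [pvConsHead_nil (pvSE_ne_nil (t.map pvF))]

theorem pvOfList_eq_empty_iff (l : List Char) : String.ofList l = "" ↔ l = [] := by
  constructor
  · intro h
    have := congrArg String.toList h
    simpa using this
  · intro h; subst h; rfl

theorem pvAlt_eq (texto : String) :
    split_homemade_v2_alt texto = (pvFixup (pvSE (texto.toList.map pvF))).map String.ofList := by
  unfold split_homemade_v2_alt
  have hrep : (PySem.Str.replace texto "\n" " ").toList = texto.toList.map pvF := by
    rw [PySem.Str.toList_replace]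
    have h1 : ("\n" : String).toList = ['\n'] := rfl
    have h2 : (" " : String).toList = [' '] := rfl
    rw [h1, h2, pvReplace_single]
  have hparts : (PySem.Str.split? (PySem.Str.replace texto "\n" " ") " ").getD []
      = (pvSE (texto.toList.map pvF)).map String.ofList := by
    unfold PySem.Str.split? PySem.Chars.split?
    have h2 : (" " : String).toList = [' '] := rfl
    rw [h2, hrep]
    simp [pvSplitOn_single]
  rw [hparts]
  set r := pvSE (texto.toList.map pvF) with hr
  have hlast : (r.map String.ofList).getLast? = Option.map String.ofList r.getLast? :=
    List.getLast?_map
  by_cases h : r.getLast? = some []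
  · rw [if_pos (by rw [hlast, h]; rfl)]
    rw [show pvFixup r = r.dropLast by simp [pvFixup, h]]
    exact (List.map_dropLast).symm
  · rw [if_neg ?_, show pvFixup r = r by simp [pvFixup, h]]
    rw [hlast]
    intro hcon
    cases hl : r.getLast? with
    | none => rw [hl] at hcon; simp at hcon
    | some x =>
      rw [hl] at hcon
      simp only [Option.map_some, Option.some.injEq] at hcon
      exact h (by rw [hl, (pvOfList_eq_empty_iff x).mp hcon])

-- ===== VERDICT (by name: the statement is the Claim_ definition above) =====
theorem split_homemade_v2_spec : Claim_equal_split_homemade_v2 := by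
  intro texto _
  unfold Spec_split_homemade_v2
  rw [pvAlt_eq]
  unfold split_homemade_v2
  rw [pvFoldA texto.toList [] []]
  rw [pvTokens_eq texto.toList []]
  rw [pvConsHead_nil (pvSE_ne_nil (texto.toList.map pvF))]
  simp
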